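-- pv_equiv track=rewrite | github.com/F1scherman/AdventOfCode2023 | helper.py | extract_int_at_location_negatives
-- ===== SOURCE A (Python) =====
-- def extract_int_at_location_negatives(string: str, location:int):
--     """This extract an integer located at a specific location in a string"""
--     if (not string[location].isdigit()) and string[location] != "-":
--         raise Exception
--
--     i = location - 1
--     while i >= 0:
--         if string[i].isdigit() or string[i] == '-':
--             i -= 1
--         else:
--             break
--     left_coord = i + 1
--
--     i = location + 1
--     while i < len(string):
--         if string[i].isdigit() or string[i] == "-":
--             i += 1
--         else:
--             break
--     right_coord = i - 1
--
--     return int(string[left_coord:right_coord + 1])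
-- ===== SOURCE B (Python) =====
-- def extract_int_at_location_negatives(string: str, location: int):
--     """Extract the integer spanning `location` in `string`, by slice-and-strip
--     instead of two outward index scans: strip run characters (digits/dash) off
--     the flanks of the two slices around `location` to find the run boundaries."""
--     if (not string[location].isdigit()) and string[location] != "-":
--         raise Exception
--     run_chars = "0123456789-"
--     start = len(string[:location].rstrip(run_chars))
--     end = len(string) - len(string[location + 1:].lstrip(run_chars))
--     return int(string[start:end])
-- ===== Notes on version B (the rewrite author's own statement) =====
-- stated objective: idiomatic
-- what changed: replaces the two outward index-scanning while-loops with slice-and-strip: rstrip/lstrip with the digit-or-dash character set applied to the two slices around location yield the run boundaries directly, then int() of one slice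
-- outside the precondition, e.g. on extract_int_at_location_negatives('123', -1): A returns 3, B returns 123
import Mathlib
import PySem

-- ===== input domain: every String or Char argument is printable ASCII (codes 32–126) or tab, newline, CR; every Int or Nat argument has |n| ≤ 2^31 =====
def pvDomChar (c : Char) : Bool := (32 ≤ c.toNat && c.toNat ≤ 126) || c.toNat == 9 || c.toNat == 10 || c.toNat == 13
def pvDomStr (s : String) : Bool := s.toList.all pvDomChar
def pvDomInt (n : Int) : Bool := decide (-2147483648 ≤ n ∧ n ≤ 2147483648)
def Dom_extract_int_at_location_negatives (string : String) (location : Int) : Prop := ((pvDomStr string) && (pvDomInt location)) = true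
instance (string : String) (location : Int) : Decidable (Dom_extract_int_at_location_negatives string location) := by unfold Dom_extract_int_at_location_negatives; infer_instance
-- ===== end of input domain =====

-- B replaces A's two outward index-scanning while-loops with slice-and-strip off the flanks; same cost, more idiomatic.


-- ===== PORT A =====
-- A's character class: string[i].isdigit() or string[i] == '-'
def pvIsRun (c : Char) : Bool := PySem.Chars.isdigit c || c == '-'

-- A's first while-loop: i = location-1; while i >= 0: if run(string[i]): i -= 1 else: break; then left_coord = i+1
def pvLeftA (l : List Char) (i : Int) : Int :=
  if h : 0 ≤ i then
    match PySem.List.pyGet? l i with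
    | some c => if pvIsRun c then pvLeftA l (i - 1) else i + 1
    | none => i + 1   -- unreachable under Pre_ (there 0 ≤ i < l.length)
  else i + 1
termination_by (i + 1).toNat
decreasing_by omega

-- A's second while-loop: i = location+1; while i < len: if run(string[i]): i += 1 else: break; then right_coord = i-1
def pvRightA (l : List Char) (i : Int) : Int :=
  if h : i < (l.length : Int) then
    match PySem.List.pyGet? l i with
    | some c => if pvIsRun c then pvRightA l (i + 1) else i - 1
    | none => i - 1   -- unreachable under Pre_ (there 0 ≤ i)
  else i - 1
termination_by ((l.length : Int) - i).toNat
decreasing_by omega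

def extract_int_at_location_negatives (string : String) (location : Int) : Int :=
  let l := string.toList
  match PySem.List.pyGet? l location with
  | none => 0              -- string[location] IndexError: outside Pre_
  | some c =>
    if ¬ pvIsRun c then 0  -- 'raise Exception': outside Pre_
    else
      let left_coord := pvLeftA l (location - 1)
      let right_coord := pvRightA l (location + 1)
      -- int(string[left_coord:right_coord+1]); int()'s ValueError (none) is outside Pre_
      (PySem.Int.ofChars? (PySem.List.slice l (some left_coord) (some (right_coord + 1)))).getD 0

-- ===== PORT B =====
def pvRunChars : List Char := "0123456789-".toList

def extract_int_at_location_negatives_alt (string : String) (location : Int) : Int :=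
  let l := string.toList
  match PySem.List.pyGet? l location with
  | none => 0              -- string[location] IndexError: outside Pre_
  | some c =>
    if ¬ (PySem.Chars.isdigit c || c == '-') then 0  -- 'raise Exception': outside Pre_
    else
      -- start = len(string[:location].rstrip(run_chars)); rstrip with a char SET is ported by hand
      -- (PySem has no rstrip-with-chars): exact — it drops exactly the trailing run characters
      let start : Int :=
        ((PySem.List.slice l none (some location)).reverse.dropWhile (fun ch => pvRunChars.contains ch)).length
      -- end = len(string) - len(string[location+1:].lstrip(run_chars)); lstrip with a char set = dropWhile (exact)
      let stop : Int :=
        (l.length : Int) - ((PySem.List.slice l (some (location + 1)) none).dropWhile (fun ch => pvRunChars.contains ch)).length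
      -- int(string[start:end]); int()'s ValueError (none) is outside Pre_
      (PySem.Int.ofChars? (PySem.List.slice l (some start) (some stop))).getD 0

-- ===== PRECONDITION & SPEC =====
-- Pre_ restricts to non-negative in-range locations that sit on a digit-or-dash character whose maximal
-- digit-or-dash run parses as an int: negative locations are outside the function's natural domain and A's
-- negative-index wraparound there returns an accidental fragment of the number (or raises); on every other
-- excluded input A raises (IndexError / the explicit 'raise Exception' / int()'s ValueError).
def Pre_extract_int_at_location_negatives (string : String) (location : Int) : Prop :=
  let l := string.toList
  let n := location.toNat
  0 ≤ location ∧ location < (l.length : Int) ∧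
  (l[n]?.any pvIsRun) = true ∧
  (PySem.Int.ofChars?
    ((l.drop (n - ((l.take n).reverse.takeWhile pvIsRun).length)).take
      ((n + 1 + ((l.drop (n + 1)).takeWhile pvIsRun).length) - (n - ((l.take n).reverse.takeWhile pvIsRun).length)))).isSome = true
instance (string : String) (location : Int) : Decidable (Pre_extract_int_at_location_negatives string location) := by unfold Pre_extract_int_at_location_negatives; infer_instance

def pvWitness_extract_int_at_location_negatives : String × Int := ("x-12y", 2)

def Spec_extract_int_at_location_negatives (string : String) (location : Int) (out : Int) : Prop := out = extract_int_at_location_negatives_alt string location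
instance (string : String) (location : Int) (out : Int) : Decidable (Spec_extract_int_at_location_negatives string location out) := by unfold Spec_extract_int_at_location_negatives; infer_instance

-- ===== CLAIM (what is proved, stated in full; the proofs are below) =====
def Claim_equal_extract_int_at_location_negatives : Prop := ∀ (string : String) (location : Int), Dom_extract_int_at_location_negatives string location → Pre_extract_int_at_location_negatives string location → Spec_extract_int_at_location_negatives string location (extract_int_at_location_negatives string location)

-- ===== LEMMAS AND PROOFS =====

-- B's membership test in "0123456789-" is exactly A's character class
theorem pvRunChars_contains (c : Char) : pvRunChars.contains c = pvIsRun c := by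
  rw [Bool.eq_iff_iff]
  have h0 : pvRunChars = ['0','1','2','3','4','5','6','7','8','9','-'] := by rfl
  rw [h0]
  simp only [List.contains_eq_mem, List.mem_cons, List.not_mem_nil, or_false, decide_eq_true_eq,
    pvIsRun, PySem.Chars.isdigit, Bool.or_eq_true, Bool.and_eq_true, beq_iff_eq,
    Char.ext_iff, Char.le_def, UInt32.le_iff_toNat_le, UInt32.ext_iff,
    show ('0':Char).val.toNat = 48 from rfl, show ('1':Char).val.toNat = 49 from rfl,
    show ('2':Char).val.toNat = 50 from rfl, show ('3':Char).val.toNat = 51 from rfl,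
    show ('4':Char).val.toNat = 52 from rfl, show ('5':Char).val.toNat = 53 from rfl,
    show ('6':Char).val.toNat = 54 from rfl, show ('7':Char).val.toNat = 55 from rfl,
    show ('8':Char).val.toNat = 56 from rfl, show ('9':Char).val.toNat = 57 from rfl,
    show ('-':Char).val.toNat = 45 from rfl]
  omega

-- A's left scan lands exactly where B's rstrip does: at the length of the prefix
-- before `location` with its trailing run characters stripped
theorem pvLeftA_eq (l : List Char) (n : Nat) (hn : n ≤ l.length) :
    pvLeftA l ((n : Int) - 1) = (((l.take n).reverse.dropWhile pvIsRun).length : Int) := by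
  induction n with
  | zero => rw [pvLeftA]; simp
  | succ n ih =>
    have hn' : n < l.length := by omega
    have hget : PySem.List.pyGet? l ((n + 1 : Nat) - 1 : Int) = some l[n] := by
      have : ((n + 1 : Nat) : Int) - 1 = ((n : Nat) : Int) := by push_cast; ring
      rw [this, PySem.List.pyGet?_natCast]
      simp [hn']
    rw [pvLeftA]
    rw [dif_pos (by push_cast; omega)]
    rw [hget]
    have htake : (l.take (n + 1)).reverse = l[n] :: (l.take n).reverse := by
      rw [List.take_add_one]
      simp [hn']
    by_cases hr : pvIsRun l[n]
    · simp only [hr, if_true]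
      have : ((n + 1 : Nat) : Int) - 1 - 1 = ((n : Nat) : Int) - 1 := by push_cast; ring
      rw [this, ih (by omega), htake, List.dropWhile_cons_of_pos hr]
    · simp only [hr]
      rw [htake, List.dropWhile_cons_of_neg (by simp [hr])]
      simp [List.length_take, Nat.min_eq_left (le_of_lt hn')]

-- A's right scan computes the end of the run starting at i: i plus the takeWhile length, minus one
theorem pvRightA_eq (l : List Char) (i : Nat) :
    pvRightA l (i : Int) = (i : Int) + (((l.drop i).takeWhile pvIsRun).length : Int) - 1 := by
  by_cases hi : i < l.length
  · have hdrop : l.drop i = l[i] :: l.drop (i + 1) := (List.drop_eq_getElem_cons hi).symm ▸ rfl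
    rw [pvRightA, dif_pos (by exact_mod_cast hi)]
    rw [show PySem.List.pyGet? l (i : Int) = some l[i] by rw [PySem.List.pyGet?_natCast]; simp [hi]]
    by_cases hr : pvIsRun l[i]
    · simp only [hr, if_true]
      have := pvRightA_eq l (i + 1)
      rw [show ((i : Int) + 1) = ((i + 1 : Nat) : Int) by push_cast; ring, this]
      rw [hdrop, List.takeWhile_cons_of_pos hr]
      simp
      ring
    · simp only [hr]
      rw [hdrop, List.takeWhile_cons_of_neg (by simp [hr])]
      simp
  · rw [pvRightA, dif_neg (by exact_mod_cast hi)]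
    rw [List.drop_eq_nil_of_le (by omega)]
    simp
termination_by l.length - i
decreasing_by omega

-- ===== VERDICT (by name: the statement is the Claim_ definition above) =====
theorem extract_int_at_location_negatives_spec : Claim_equal_extract_int_at_location_negatives := by
  intro string location hdom hpre
  unfold Spec_extract_int_at_location_negatives
  simp only [Pre_extract_int_at_location_negatives] at hpre
  obtain ⟨h0, h1, h2, -⟩ := hpre
  set l := string.toList with hl
  set n := location.toNat with hn
  have hloc : location = (n : Int) := (Int.toNat_of_nonneg h0).symm
  have hnlen : n < l.length := by omega
  have hget : PySem.List.pyGet? l location = some l[n] := by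
    rw [hloc, PySem.List.pyGet?_natCast]; simp [hnlen]
  have hrun : pvIsRun l[n] = true := by
    rw [List.getElem?_eq_getElem hnlen] at h2; simpa using h2
  have hfun : (fun ch => pvRunChars.contains ch) = pvIsRun := funext pvRunChars_contains
  simp only [extract_int_at_location_negatives, extract_int_at_location_negatives_alt, ← hl, hget]
  have hcond : (PySem.Chars.isdigit l[n] || l[n] == '-') = true := hrun
  rw [if_neg (by simp [hrun]), if_neg (by simp [hcond])]
  have e1 : pvLeftA l (location - 1)
      = (((PySem.List.slice l none (some location)).reverse.dropWhile (fun ch => pvRunChars.contains ch)).length : Int) := by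
    rw [hfun, hloc, PySem.List.slice_to_natCast]
    exact pvLeftA_eq l n (le_of_lt hnlen)
  have e2 : pvRightA l (location + 1) + 1
      = (l.length : Int) - (((PySem.List.slice l (some (location + 1)) none).dropWhile (fun ch => pvRunChars.contains ch)).length : Int) := by
    rw [hfun, hloc]
    rw [show ((n : Int) + 1) = ((n + 1 : Nat) : Int) by push_cast; ring]
    rw [PySem.List.slice_from_natCast, pvRightA_eq]
    have hsum : ((l.drop (n+1)).takeWhile pvIsRun).length + ((l.drop (n+1)).dropWhile pvIsRun).length
        = l.length - (n+1) := by
      rw [← List.length_append, List.takeWhile_append_dropWhile, List.length_drop]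
    have : n + 1 ≤ l.length := hnlen
    push_cast
    omega
  rw [e1, e2]
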